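-- pv_equiv track=rewrite | github.com/Bens-Organization/mercedes-nl-search | src/indexer.py | _clean_and_deduplicate_categories
-- ===== SOURCE A (Python) =====
-- from typing import List, Dict, Any
--
-- def _clean_and_deduplicate_categories(raw_categories: List[str]) -> List[str]:
--     """
--     Clean and deduplicate category names.
--
--     Removes "Mercedes Scientific Main Store/" prefix and deduplicates categories
--     that have the same end path (e.g., multiple "Shop By Lab" variations).
--     Prefers shorter, more direct paths (Products over Shop By Lab).
--     """
--     if not raw_categories:
--         return []
--
--     # Step 1: Clean category names by removing prefix
--     cleaned = []
--     for cat in raw_categories: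
--         # Remove the "Mercedes Scientific Main Store/" prefix
--         cleaned_cat = cat.replace("Mercedes Scientific Main Store/", "")
--         if cleaned_cat:
--             cleaned.append(cleaned_cat)
--
--     # Step 2: Deduplicate by end path
--     # Keep track of end paths we've seen (after last '/')
--     seen_end_paths = {}
--     unique_categories = []
--
--     for cat in cleaned:
--         # Extract the end path (e.g., "Specimen Collection/Cytology")
--         parts = cat.split('/')
--
--         # Consider the last 2 segments as the "end path" for deduplication
--         # This handles cases like "Products/Gloves" vs "Shop By Lab/Chemistry/Gloves"
--         if len(parts) >= 2:
--             end_path = '/'.join(parts[-2:])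
--         else:
--             end_path = cat
--
--         # If we haven't seen this end path, or if this is a shorter path, keep it
--         if end_path not in seen_end_paths:
--             seen_end_paths[end_path] = cat
--             unique_categories.append(cat)
--         else:
--             # If this path is shorter, replace the existing one
--             existing = seen_end_paths[end_path]
--             if len(cat) < len(existing):
--                 # Remove the old one and add the new shorter one
--                 if existing in unique_categories:
--                     unique_categories.remove(existing)
--                 seen_end_paths[end_path] = cat
--                 unique_categories.append(cat)
--
--     # Step 3: Sort to have "Products" paths first, then others
--     unique_categories.sort(key=lambda x: (not x.startswith('Products/'), len(x), x))
--
--     return unique_categories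
-- ===== SOURCE B (Python) =====
-- from typing import List
--
-- def _clean_and_deduplicate_categories(raw_categories: List[str]) -> List[str]:
--     # Pass 1: strip the store prefix, drop empties.
--     cleaned = [c for c in (cat.replace("Mercedes Scientific Main Store/", "") for cat in raw_categories) if c]
--
--     # Pass 2: group cleaned categories by their end path (last two segments).
--     groups = {}
--     for cat in cleaned:
--         parts = cat.split('/')
--         end_path = '/'.join(parts[-2:]) if len(parts) >= 2 else cat
--         groups.setdefault(end_path, []).append(cat)
--
--     # Pass 3: one winner per group — the first shortest path — then sort.
--     winners = [min(group, key=len) for group in groups.values()]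
--     winners.sort(key=lambda x: (not x.startswith('Products/'), len(x), x))
--     return winners
-- ===== Notes on version B (the rewrite author's own statement) =====
-- stated objective: simpler
-- what changed: Replaces A's incremental seen-dict + unique-list bookkeeping (with remove/re-append on shorter paths) by three passes: clean, group cleaned categories by end path into a dict of lists, then take the first-shortest member of each group and sort.
import Mathlib
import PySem

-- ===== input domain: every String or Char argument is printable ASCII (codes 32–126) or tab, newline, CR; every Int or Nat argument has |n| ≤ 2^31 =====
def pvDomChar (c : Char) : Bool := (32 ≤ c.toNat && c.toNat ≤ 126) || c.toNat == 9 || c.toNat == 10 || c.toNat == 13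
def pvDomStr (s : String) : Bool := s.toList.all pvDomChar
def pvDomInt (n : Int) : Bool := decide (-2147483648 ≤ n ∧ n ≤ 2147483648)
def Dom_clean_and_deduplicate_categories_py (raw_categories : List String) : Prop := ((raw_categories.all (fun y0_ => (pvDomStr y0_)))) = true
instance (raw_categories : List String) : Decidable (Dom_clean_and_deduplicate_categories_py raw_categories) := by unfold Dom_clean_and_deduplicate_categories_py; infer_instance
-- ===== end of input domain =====

-- B replaces A's incremental seen-dict + unique-list bookkeeping by clean / group-by-end-path / pick-first-shortest-and-sort (objective: simpler).

-- ===== PORT A =====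
-- shared pure helpers: the store prefix, the end-path extraction, and the sort key
def pvPrefix : String := "Mercedes Scientific Main Store/"

-- end_path: '/'.join(parts[-2:]) if len(parts) >= 2 else cat ; the separator "/" is nonempty, so split? never returns none
def pvEndPath (cat : String) : String :=
  let parts := (PySem.Str.split? cat "/").getD []
  if parts.length ≥ 2 then PySem.Str.join "/" (PySem.List.slice parts (some (-2)) none) else cat

-- the sort key's strict order: (not x.startswith('Products/'), len(x), x) compared as Python compares tuples
def pvTupleLt (a b : String) : Bool :=
  let pa := !(PySem.Str.startswith a "Products/")
  let pb := !(PySem.Str.startswith b "Products/")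
  (!pa && pb) || (pa == pb && (PySem.Str.len a < PySem.Str.len b ||
    (PySem.Str.len a == PySem.Str.len b && decide (a < b))))

-- sort(key=lambda x: (not x.startswith('Products/'), len(x), x)): PySem's stable insertion
-- sort (PySem.List.sorted_eq_foldl_insertBy) with the tuple order written out as a comparator
def pvSortKey (xs : List String) : List String :=
  xs.foldl (fun acc x => PySem.List.insertBy pvTupleLt x acc) []

def clean_and_deduplicate_categories_py (raw_categories : List String) : List String :=
  if raw_categories = [] then [] else
  -- Step 1: clean
  let cleaned := raw_categories.foldl (fun acc cat =>
    let cleaned_cat := PySem.Str.replace cat pvPrefix ""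
    if cleaned_cat ≠ "" then acc ++ [cleaned_cat] else acc) []
  -- Step 2: dedup by end path, state = (seen_end_paths, unique_categories)
  let st := cleaned.foldl (fun (st : PySem.Dict String String × List String) cat =>
    let end_path := pvEndPath cat
    if !st.1.contains end_path then
      (st.1.insert end_path cat, st.2 ++ [cat])
    else
      let existing := st.1.getD end_path ""   -- the key is present, so the default is never used
      if PySem.Str.len cat < PySem.Str.len existing then
        let u := if existing ∈ st.2 then (PySem.List.remove? st.2 existing).getD st.2 else st.2
        (st.1.insert end_path cat, u ++ [cat])
      else st) (PySem.Dict.empty, [])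
  -- Step 3: sort
  pvSortKey st.2

-- ===== PORT B =====
def clean_and_deduplicate_categories_py_alt (raw_categories : List String) : List String :=
  let cleaned := (raw_categories.map (fun cat => PySem.Str.replace cat pvPrefix "")).filter (fun c => c ≠ "")
  let groups := cleaned.foldl (fun g cat =>
    g.insert (pvEndPath cat) (g.getD (pvEndPath cat) [] ++ [cat])) PySem.Dict.empty
  -- min(group, key=len); every group is nonempty, so the default is never used
  let winners := groups.values.map (fun group => (PySem.List.min? group (fun s => PySem.Str.len s)).getD "")
  pvSortKey winners

-- ===== PRECONDITION & SPEC =====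
def Spec_clean_and_deduplicate_categories_py (raw_categories : List String) (out : List String) : Prop := out = clean_and_deduplicate_categories_py_alt raw_categories
instance (raw_categories : List String) (out : List String) : Decidable (Spec_clean_and_deduplicate_categories_py raw_categories out) := by unfold Spec_clean_and_deduplicate_categories_py; infer_instance

-- ===== CLAIM (what is proved, stated in full; the proofs are below) =====
def Claim_equal_clean_and_deduplicate_categories_py : Prop := ∀ (raw_categories : List String), Dom_clean_and_deduplicate_categories_py raw_categories → Spec_clean_and_deduplicate_categories_py raw_categories (clean_and_deduplicate_categories_py raw_categories)

-- ===== LEMMAS AND PROOFS =====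

-- the sort key as a lexicographic value (proof-side view of pvTupleLt)
def pvKey (x : String) : Bool ×ₗ (ℤ ×ₗ String) :=
  toLex (!(PySem.Str.startswith x "Products/"), toLex (PySem.Str.len x, x))

lemma pvTupleLt_eq_key_lt : pvTupleLt = fun a b => decide (pvKey a < pvKey b) := by
  funext a b
  rw [Bool.eq_iff_iff]
  simp [pvTupleLt, pvKey, Prod.Lex.lt_iff, Bool.lt_iff, Nat.cast_lt]

lemma pvSortKey_eq_sorted (xs : List String) : pvSortKey xs = PySem.List.sorted xs pvKey := by
  rw [PySem.List.sorted_eq_foldl_insertBy, pvSortKey, pvTupleLt_eq_key_lt]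

-- A's loop body and B's loop body, named for the proofs (definitionally the ports' lambdas)
def pvFA (st : PySem.Dict String String × List String) (cat : String) :
    PySem.Dict String String × List String :=
  let end_path := pvEndPath cat
  if !st.1.contains end_path then
    (st.1.insert end_path cat, st.2 ++ [cat])
  else
    let existing := st.1.getD end_path ""
    if PySem.Str.len cat < PySem.Str.len existing then
      let u := if existing ∈ st.2 then (PySem.List.remove? st.2 existing).getD st.2 else st.2
      (st.1.insert end_path cat, u ++ [cat])
    else st

def pvFB (g : PySem.Dict String (List String)) (cat : String) : PySem.Dict String (List String) :=
  g.insert (pvEndPath cat) (g.getD (pvEndPath cat) [] ++ [cat])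

-- the per-group winner B computes (definitionally B's min-expression)
def pvW (gl : List String) : String := (PySem.List.min? gl (fun s => PySem.Str.len s)).getD ""

-- A's seen_end_paths, expressed as B's groups with each group replaced by its winner
def pvF (g : PySem.Dict String (List String)) : PySem.Dict String String :=
  PySem.Dict.mk (g.items.map (fun p => (p.1, pvW p.2)))

lemma pvF_get? (g : PySem.Dict String (List String)) (k : String) :
    (pvF g).get? k = (g.get? k).map pvW := by
  obtain ⟨l⟩ := g
  induction l with
  | nil => rfl
  | cons p t ih =>
    show (PySem.Dict.mk ((p.1, pvW p.2) :: t.map _)).get? k = _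
    rw [PySem.Dict.get?_mk_cons, PySem.Dict.get?_mk_cons]
    by_cases h : p.1 == k
    · simp [h]
    · simp only [h, Bool.false_eq_true, ite_false]
      exact ih

lemma pvF_contains (g : PySem.Dict String (List String)) (k : String) :
    (pvF g).contains k = g.contains k := by
  rw [PySem.Dict.contains_eq_isSome_get?, PySem.Dict.contains_eq_isSome_get?, pvF_get?]
  cases g.get? k <;> rfl

lemma pvF_keys (g : PySem.Dict String (List String)) : (pvF g).keys = g.keys := by
  show (g.items.map _).map Prod.fst = g.items.map Prod.fst
  rw [List.map_map]
  rfl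

lemma pvF_values (g : PySem.Dict String (List String)) :
    (pvF g).values = g.items.map (fun p => pvW p.2) := by
  show (g.items.map _).map Prod.snd = _
  rw [List.map_map]
  rfl

lemma pvF_insert (g : PySem.Dict String (List String)) (k : String) (gl : List String) :
    pvF (g.insert k gl) = (pvF g).insert k (pvW gl) := by
  apply PySem.Dict.ext
  show (g.insert k gl).items.map _ = _
  rw [PySem.Dict.items_insert, PySem.Dict.items_insert, pvF_contains]
  by_cases h : g.contains k
  · simp only [h, if_true]
    show _ = ((g.items.map _).map _)
    rw [List.map_map, List.map_map]
    apply List.map_congr_left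
    intro p _
    show ((if (p.1 == k) = true then (k, gl) else p).1, pvW _) = _
    by_cases h' : (p.1 == k) = true
    · have h'' : p.1 = k := by simpa using h'
      simp [h'']
    · have h'' : ¬ p.1 = k := by simpa using h'
      simp [h', h'']
  · simp only [h, Bool.false_eq_true, if_false, List.map_append]
    rfl

lemma pvW_spec (gl : List String) (hne : gl ≠ []) :
    PySem.List.min? gl (fun s => PySem.Str.len s) = some (pvW gl) := by
  have h2 : PySem.List.min? gl (fun s => PySem.Str.len s) ≠ none := by
    rw [Ne, PySem.List.min?_eq_none_iff]; exact hne
  cases h : PySem.List.min? gl (fun s => PySem.Str.len s) with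
  | none => exact absurd h h2
  | some m => simp only [pvW, h, Option.getD_some]

-- one fold step of min-by-len over an appended element
lemma pvMin?_append (gl : List String) (c m : String)
    (h : PySem.List.min? gl (fun s => PySem.Str.len s) = some m) :
    PySem.List.min? (gl ++ [c]) (fun s => PySem.Str.len s) =
      some (if PySem.Str.len c < PySem.Str.len m then c else m) := by
  simp only [PySem.List.min?] at *
  rw [List.foldl_append, h]
  simp only [List.foldl]
  split_ifs <;> rfl

-- the invariant A's loop state keeps relative to B's groups dict
def pvInv (g : PySem.Dict String (List String)) (u : List String) : Prop :=
  g.keys.Nodup ∧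
  (∀ p ∈ g.items, p.2 ≠ [] ∧ ∀ c ∈ p.2, pvEndPath c = p.1) ∧
  u.Perm ((pvF g).values)

-- every stored winner's end path is its own key
lemma pvItem_ep (g : PySem.Dict String (List String))
    (hp : ∀ p ∈ g.items, p.2 ≠ [] ∧ ∀ c ∈ p.2, pvEndPath c = p.1) :
    ∀ q ∈ (pvF g).items, pvEndPath q.2 = q.1 := by
  intro q hq
  have : ∃ p ∈ g.items, (p.1, pvW p.2) = q := by
    simpa [pvF] using hq
  obtain ⟨p, hpmem, rfl⟩ := this
  obtain ⟨hne, hep⟩ := hp p hpmem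
  exact hep _ (PySem.List.min?_mem (pvW_spec p.2 hne))

-- one loop step: A's state stays the pvF-image of B's groups, and the invariant is preserved
lemma pvStep (g : PySem.Dict String (List String)) (u : List String) (cat : String)
    (hinv : pvInv g u) :
    pvFA (pvF g, u) cat = (pvF (pvFB g cat), (pvFA (pvF g, u) cat).2) ∧
    pvInv (pvFB g cat) (pvFA (pvF g, u) cat).2 := by
  obtain ⟨hnd, hp, hperm⟩ := hinv
  set k := pvEndPath cat with hk
  by_cases hc : g.contains k
  · -- key already present
    obtain ⟨gl, hget⟩ : ∃ gl, g.get? k = some gl := by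
      have := PySem.Dict.contains_eq_isSome_get? g k
      rw [hc] at this
      exact Option.isSome_iff_exists.mp this.symm
    have hglmem : (k, gl) ∈ g.items := PySem.Dict.mem_items_of_get?_eq_some g hget
    obtain ⟨hglne, hglep⟩ := hp _ hglmem
    have hm : PySem.List.min? gl (fun s => PySem.Str.len s) = some (pvW gl) := pvW_spec gl hglne
    have hgetD : (pvF g).getD k "" = pvW gl := by
      apply PySem.Dict.getD_of_get?_eq_some
      rw [pvF_get?, hget]; rfl
    have hcF : (pvF g).contains k = true := by rw [pvF_contains]; exact hc
    have hgetDB : g.getD k [] = gl := PySem.Dict.getD_of_get?_eq_some g [] hget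
    have hnewW : pvW (gl ++ [cat]) =
        if PySem.Str.len cat < PySem.Str.len (pvW gl) then cat else pvW gl := by
      rw [pvW, pvMin?_append gl cat (pvW gl) hm]; rfl
    have hinv2 : ∀ p ∈ (pvFB g cat).items, p.2 ≠ [] ∧ ∀ c ∈ p.2, pvEndPath c = p.1 := by
      intro p hpmem
      rw [pvFB, ← hk, hgetDB] at hpmem
      rcases (PySem.Dict.mem_items_insert g k (gl ++ [cat]) p).mp hpmem with h | ⟨h, _⟩
      · subst h
        refine ⟨by simp, ?_⟩
        intro c hcmem
        rcases List.mem_append.mp hcmem with h | h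
        · exact hglep c h
        · simp only [List.mem_singleton] at h; subst h; exact hk.symm
      · exact hp p h
    have hnd2 : (pvFB g cat).keys.Nodup := by
      rw [pvFB, ← hk]
      exact PySem.Dict.nodup_keys_insert g k _ hnd
    by_cases hlt : PySem.Str.len cat < PySem.Str.len (pvW gl)
    · -- strictly shorter: replace
      have hmemv : pvW gl ∈ (pvF g).values := by
        have : (k, pvW gl) ∈ (pvF g).items := by
          simp only [pvF]
          exact List.mem_map_of_mem hglmem
        exact List.mem_map_of_mem this
      have hmu : pvW gl ∈ u := hperm.mem_iff.mpr hmemv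
      have hrm : (PySem.List.remove? u (pvW gl)).getD u = u.erase (pvW gl) := by
        rw [PySem.List.remove?_eq_some_erase u _ hmu]; rfl
      have hstep : pvFA (pvF g, u) cat = ((pvF g).insert k cat, u.erase (pvW gl) ++ [cat]) := by
        rw [pvFA]
        simp only [← hk, hcF, Bool.not_true, Bool.false_eq_true, if_false, hgetD,
          if_pos hlt, if_pos hmu, hrm]
      have hdict : pvF (pvFB g cat) = (pvF g).insert k cat := by
        rw [pvFB, ← hk, hgetDB, pvF_insert, hnewW, if_pos hlt]
      refine ⟨by rw [hstep, hdict], hnd2, hinv2, ?_⟩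
      rw [hstep, hdict]
      -- decompose (pvF g).items around the (k, pvW gl) entry
      have hmemF : (k, pvW gl) ∈ (pvF g).items := by
        simp only [pvF]; exact List.mem_map_of_mem hglmem
      obtain ⟨l1, l2, hsplit⟩ := List.append_of_mem hmemF
      have hndF : ((pvF g).items.map Prod.fst).Nodup := by
        have : (pvF g).keys = (pvF g).items.map Prod.fst := rfl
        rw [← this, pvF_keys]; exact hnd
    
      have hk1 : k ∉ l1.map Prod.fst ∧ k ∉ l2.map Prod.fst := by
        rw [hsplit, List.map_append, List.map_cons] at hndF
        have h := List.nodup_append.mp hndF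
        refine ⟨fun hmem => h.2.2 k hmem k List.mem_cons_self rfl, ?_⟩
        exact (List.nodup_cons.mp h.2.1).1
      have hitems' : ((pvF g).insert k cat).items = l1 ++ (k, cat) :: l2 := by
        rw [PySem.Dict.items_insert_of_contains (pvF g) cat hcF, hsplit, List.map_append,
          List.map_cons]
        have e1 : l1.map (fun p => if (p.1 == k) = true then (k, cat) else p) = l1 := by
          conv_rhs => rw [← List.map_id l1]
          apply List.map_congr_left
          intro p hpm
          have hne : p.1 ≠ k := fun he => hk1.1 (he ▸ List.mem_map_of_mem hpm)
          simp [hne]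
        have e2 : l2.map (fun p => if (p.1 == k) = true then (k, cat) else p) = l2 := by
          conv_rhs => rw [← List.map_id l2]
          apply List.map_congr_left
          intro p hpm
          have hne : p.1 ≠ k := fun he => hk1.2 (he ▸ List.mem_map_of_mem hpm)
          simp [hne]
        rw [e1, e2]
        simp
      have hv : (pvF g).values = l1.map Prod.snd ++ pvW gl :: l2.map Prod.snd := by
        show (pvF g).items.map Prod.snd = _
        rw [hsplit, List.map_append, List.map_cons]
      have hv' : ((pvF g).insert k cat).values = l1.map Prod.snd ++ cat :: l2.map Prod.snd := by
        show ((pvF g).insert k cat).items.map Prod.snd = _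
        rw [hitems', List.map_append, List.map_cons]
      have hepm : pvEndPath (pvW gl) = k := hglep _ (PySem.List.min?_mem hm)
      have hml1 : pvW gl ∉ l1.map Prod.snd := by
        intro hmem
        obtain ⟨p, hpm, hpe⟩ := List.mem_map.mp hmem
        have hpi : p ∈ (pvF g).items := by
          rw [hsplit]
          exact List.mem_append.mpr (Or.inl hpm)
        have := pvItem_ep g hp p hpi
        rw [hpe, hepm] at this
        exact hk1.1 (this ▸ List.mem_map_of_mem hpm)
      have herase : (pvF g).values.erase (pvW gl) = l1.map Prod.snd ++ l2.map Prod.snd := by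
        rw [hv, List.erase_append_right _ hml1, List.erase_cons_head]
      refine ((hperm.erase _).append_right [cat]).trans ?_
      rw [herase, hv']
      exact (List.perm_append_singleton _ _).trans List.perm_middle.symm
    · -- not shorter: state unchanged, dict image unchanged
      have hstep : pvFA (pvF g, u) cat = (pvF g, u) := by
        rw [pvFA]
        simp only [← hk, hcF, Bool.not_true, Bool.false_eq_true, if_false, hgetD, if_neg hlt]
      have hdict : pvF (pvFB g cat) = pvF g := by
        rw [pvFB, ← hk, hgetDB, pvF_insert, hnewW, if_neg hlt]
        apply PySem.Dict.ext
        rw [PySem.Dict.items_insert_of_contains (pvF g) _ hcF]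
        have hndF : (pvF g).keys.Nodup := by rw [pvF_keys]; exact hnd
        conv_rhs => rw [← List.map_id ((pvF g).items)]
        apply List.map_congr_left
        intro p hpm
        by_cases hpk : p.1 == k
        · have hpk' : p.1 = k := by simpa using hpk
          have : (pvF g).get? p.1 = some p.2 := PySem.Dict.get?_of_mem_items (pvF g) hpm hndF
          rw [hpk', pvF_get?, hget] at this
          have hp2 : p.2 = pvW gl := by simpa using this.symm
          simp [← hpk', ← hp2]
        · simp [hpk]
      refine ⟨by rw [hstep, hdict], hnd2, hinv2, ?_⟩
      rw [hstep, hdict]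
      exact hperm
  · -- fresh key
    have hcF : (pvF g).contains k = false := by rw [pvF_contains]; simpa using hc
    have hgetDB : g.getD k [] = [] := PySem.Dict.getD_of_not_contains g [] (by simpa using hc)
    have hstep : pvFA (pvF g, u) cat = ((pvF g).insert k cat, u ++ [cat]) := by
      rw [pvFA]
      simp only [← hk, hcF, Bool.not_false, if_true]
    have hdict : pvF (pvFB g cat) = (pvF g).insert k cat := by
      rw [pvFB, ← hk, hgetDB, pvF_insert]
      rfl
    refine ⟨by rw [hstep, hdict], ?_, ?_, ?_⟩
    · rw [pvFB, ← hk]; exact PySem.Dict.nodup_keys_insert g k _ hnd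
    · intro p hpmem
      rw [pvFB, ← hk, hgetDB] at hpmem
      rcases (PySem.Dict.mem_items_insert g k ([] ++ [cat]) p).mp hpmem with h | ⟨h, _⟩
      · subst h
        refine ⟨by simp, ?_⟩
        intro c hcmem
        simp only [List.nil_append, List.mem_singleton] at hcmem
        subst hcmem; exact hk.symm
      · exact hp p h
    · rw [hstep, hdict]
      have : ((pvF g).insert k cat).values = (pvF g).values ++ [cat] := by
        show ((pvF g).insert k cat).items.map Prod.snd = _
        rw [PySem.Dict.items_insert_of_not_contains (pvF g) cat hcF, List.map_append]
        rfl
      rw [this]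
      exact hperm.append_right [cat]

-- the whole loop: A's fold stays the pvF-image of B's fold, with the final unique list a permutation of the winners
lemma pvLoop (l : List String) (g : PySem.Dict String (List String)) (u : List String)
    (hinv : pvInv g u) :
    ∃ u', l.foldl pvFA (pvF g, u) = (pvF (l.foldl pvFB g), u') ∧ pvInv (l.foldl pvFB g) u' := by
  induction l generalizing g u with
  | nil => exact ⟨u, rfl, hinv⟩
  | cons cat t ih =>
    obtain ⟨hfst, hinv'⟩ := pvStep g u cat hinv
    rw [List.foldl_cons, List.foldl_cons, hfst]
    exact ih (pvFB g cat) _ hinv'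

-- A's cleaning loop builds exactly B's map-then-filter list
lemma pvClean (l : List String) (acc : List String) :
    l.foldl (fun acc cat =>
      let cleaned_cat := PySem.Str.replace cat pvPrefix ""
      if cleaned_cat ≠ "" then acc ++ [cleaned_cat] else acc) acc
    = acc ++ (l.map (fun cat => PySem.Str.replace cat pvPrefix "")).filter (fun c => c ≠ "") := by
  induction l generalizing acc with
  | nil => simp
  | cons x t ih =>
    rw [List.foldl_cons, List.map_cons, List.filter_cons]
    by_cases h : PySem.Str.replace x pvPrefix "" = ""
    · rw [show (let cleaned_cat := PySem.Str.replace x pvPrefix ""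
          if cleaned_cat ≠ "" then acc ++ [cleaned_cat] else acc) = acc from by simp [h],
        ih]
      simp [h]
    · rw [show (let cleaned_cat := PySem.Str.replace x pvPrefix ""
          if cleaned_cat ≠ "" then acc ++ [cleaned_cat] else acc)
            = acc ++ [PySem.Str.replace x pvPrefix ""] from by simp [h],
        ih]
      simp [h, List.append_assoc]

lemma pvKey_inj : Function.Injective pvKey := by
  intro a b h
  have := congrArg (fun t => (ofLex (ofLex t).2).2) h
  simpa [pvKey] using this

-- ===== VERDICT (by name: the statement is the Claim_ definition above) =====
theorem clean_and_deduplicate_categories_py_spec : Claim_equal_clean_and_deduplicate_categories_py := by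
  unfold Claim_equal_clean_and_deduplicate_categories_py
  intro raw _
  unfold Spec_clean_and_deduplicate_categories_py
  by_cases hraw : raw = []
  · subst hraw; rfl
  · have hinv0 : pvInv PySem.Dict.empty [] := by
      refine ⟨PySem.Dict.nodup_keys_empty, ?_, ?_⟩
      · intro p hp
        simp [PySem.Dict.empty] at hp
      · exact List.Perm.refl _
    obtain ⟨u', heq, hinv'⟩ := pvLoop
      (List.filter (fun c => c ≠ "") (raw.map (fun cat => PySem.Str.replace cat pvPrefix "")))
      PySem.Dict.empty [] hinv0
    have hA : clean_and_deduplicate_categories_py raw = PySem.List.sorted u' pvKey := by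
      rw [clean_and_deduplicate_categories_py, if_neg hraw]
      show pvSortKey ((List.foldl _ [] raw).foldl pvFA (pvF PySem.Dict.empty, [])).2 = _
      rw [pvClean, List.nil_append, heq, pvSortKey_eq_sorted]
    have hB : clean_and_deduplicate_categories_py_alt raw =
        PySem.List.sorted ((pvF (List.foldl pvFB PySem.Dict.empty
          (List.filter (fun c => c ≠ "") (raw.map (fun cat =>
            PySem.Str.replace cat pvPrefix ""))))).values) pvKey := by
      rw [clean_and_deduplicate_categories_py_alt]
      show pvSortKey
        (List.map _ (List.map Prod.snd (List.foldl pvFB PySem.Dict.empty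
          (List.filter (fun c => c ≠ "") (raw.map (fun cat =>
            PySem.Str.replace cat pvPrefix "")))).items)) = _
      rw [List.map_map, pvF_values, pvSortKey_eq_sorted]
      rfl
    rw [hA, hB]
    exact PySem.List.sorted_eq_sorted_of_perm _ _ pvKey pvKey_inj hinv'.2.2
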